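-- pv_equiv track=rewrite | github.com/CRYang369/Python-Exercise | fish and bite.py | max_fish_with_baits
-- ===== SOURCE A (Python) =====
-- def max_fish_with_baits(fish, baits):
--     fish.sort(reverse=True)
--     baits.sort(reverse=True)
--     max_fish_count = 0
--
--     for bait in baits:
--         count = min(3, len([f for f in fish if f > bait]))
--         max_fish_count += count
--         fish = fish[count:]
--
--     return max_fish_count
-- ===== SOURCE B (Python) =====
-- def max_fish_with_baits(fish, baits):
--     fish.sort(reverse=True)
--     baits.sort(reverse=True)
--     total = 0      # number of fish caught so far (= number of fish consumed)
--     p = 0          # pointer: number of fish known to exceed the current bait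
--     for bait in baits:
--         while p < len(fish) and fish[p] > bait:
--             p += 1
--         total += min(3, p - total)
--     return total
-- ===== Notes on version B (the rewrite author's own statement) =====
-- stated objective: faster
-- what changed: Replaces the per-bait list comprehension and list re-slicing with a single monotone two-pointer sweep over the descending-sorted fish (the pointer counts fish exceeding the current bait; the running total doubles as the consumed-prefix index), so no list is rebuilt and each fish is visited once.
import Mathlib
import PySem

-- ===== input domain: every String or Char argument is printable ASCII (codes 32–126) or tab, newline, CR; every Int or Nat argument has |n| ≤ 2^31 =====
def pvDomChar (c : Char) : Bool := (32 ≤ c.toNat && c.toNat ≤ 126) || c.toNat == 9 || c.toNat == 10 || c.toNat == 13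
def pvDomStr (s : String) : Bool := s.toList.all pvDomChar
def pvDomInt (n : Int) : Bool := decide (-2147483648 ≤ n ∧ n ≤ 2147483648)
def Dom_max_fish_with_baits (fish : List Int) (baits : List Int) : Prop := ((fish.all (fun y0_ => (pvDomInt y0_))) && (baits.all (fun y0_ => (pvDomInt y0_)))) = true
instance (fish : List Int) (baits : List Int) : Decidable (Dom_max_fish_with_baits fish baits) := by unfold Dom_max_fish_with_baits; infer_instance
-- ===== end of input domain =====

-- B replaces A's per-bait filter-and-reslice with a two-pointer sweep over the sorted fish
-- (objective: faster). Both A and B sort `fish` and `baits` in place in Python; the theorems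
-- here are about the return value only.

-- ===== PORT A =====
def max_fish_with_baits (fish : List Int) (baits : List Int) : Int :=
  let fish := PySem.List.sorted fish (fun x => x) true
  let baits := PySem.List.sorted baits (fun x => x) true
  (baits.foldl (fun (st : List Int × Int) bait =>
      let count : Int := min 3 (((st.1.filter (fun f => decide (bait < f))).length : Int))
      (PySem.List.slice st.1 (some count) none, st.2 + count))
    (fish, 0)).2

-- ===== PORT B =====
-- the inner `while p < len(fish) and fish[p] > bait: p += 1` loop of Source B
def pvWhileB (fish : List Int) (bait : Int) (p : Nat) : Nat :=
  if h : p < fish.length then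
    if bait < fish[p] then pvWhileB fish bait (p + 1) else p
  else p
termination_by fish.length - p

def max_fish_with_baits_alt (fish : List Int) (baits : List Int) : Int :=
  let fish := PySem.List.sorted fish (fun x => x) true
  let baits := PySem.List.sorted baits (fun x => x) true
  (baits.foldl (fun (st : Int × Nat) bait =>
      let p := pvWhileB fish bait st.2
      (st.1 + min 3 ((p : Int) - st.1), p))
    (0, 0)).1

-- ===== PRECONDITION & SPEC =====
def Spec_max_fish_with_baits (fish : List Int) (baits : List Int) (out : Int) : Prop := out = max_fish_with_baits_alt fish baits
instance (fish : List Int) (baits : List Int) (out : Int) : Decidable (Spec_max_fish_with_baits fish baits out) := by unfold Spec_max_fish_with_baits; infer_instance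

-- ===== CLAIM (what is proved, stated in full; the proofs are below) =====
def Claim_equal_max_fish_with_baits : Prop := ∀ (fish : List Int) (baits : List Int), Dom_max_fish_with_baits fish baits → Spec_max_fish_with_baits fish baits (max_fish_with_baits fish baits)

-- ===== LEMMAS AND PROOFS =====

-- number of leading fish strictly exceeding bait b
def wlen (b : Int) (fs : List Int) : Nat := (fs.takeWhile (fun f => decide (b < f))).length

-- On a descending list, the fish exceeding b form a prefix.
theorem filter_eq_takeWhile_of_sorted (b : Int) :
    ∀ (fs : List Int), fs.Pairwise (fun a c => c ≤ a) →
      fs.filter (fun f => decide (b < f)) = fs.takeWhile (fun f => decide (b < f)) := by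
  intro fs h
  induction fs with
  | nil => rfl
  | cons x rest ih =>
    rcases List.pairwise_cons.mp h with ⟨hx, hrest⟩
    by_cases hbx : b < x
    · simp [hbx, ih hrest]
    · have : rest.filter (fun f => decide (b < f)) = [] := by
        rw [List.filter_eq_nil_iff]
        intro f hf
        have := hx f hf
        simp only [decide_eq_true_eq]
        omega
      simp [hbx, this]

-- takeWhile after dropping ≤ wlen elements drops from the takeWhile prefix
theorem takeWhile_drop (q : Int → Bool) :
    ∀ (t : Nat) (fs : List Int), t ≤ (fs.takeWhile q).length →
      (fs.drop t).takeWhile q = (fs.takeWhile q).drop t := by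
  intro t
  induction t with
  | zero => simp
  | succ t ih =>
    intro fs ht
    cases fs with
    | nil => simp
    | cons x rest =>
      by_cases hq : q x
      · simp only [List.takeWhile_cons, hq, if_true, List.length_cons] at ht ⊢
        simpa using ih rest (by omega)
      · simp [hq] at ht

-- the while loop counts the remaining leading fish exceeding bait
theorem pvWhileB_eq (fish : List Int) (bait : Int) :
    ∀ (p : Nat), pvWhileB fish bait p = p + wlen bait (fish.drop p) := by
  intro p
  induction hk : fish.length - p using Nat.strong_induction_on generalizing p with
  | _ k ih =>
    unfold pvWhileB
    by_cases hp : p < fish.length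
    · have hdrop : fish.drop p = fish[p] :: fish.drop (p + 1) :=
        (List.drop_eq_getElem_cons hp)
      by_cases hb : bait < fish[p]
      · have := ih (fish.length - (p + 1)) (by omega) (p + 1) rfl
        simp only [hp, hb, dif_pos, if_pos, this, wlen, hdrop, List.takeWhile_cons,
          decide_eq_true_eq]
        simp only [List.length_cons]
        omega
      · simp only [hp, hb, dif_pos, wlen, hdrop, List.takeWhile_cons]
        rw [if_neg (by simpa using hb)]
        simp
    · have : fish.drop p = [] := List.drop_eq_nil_of_le (by omega)
      simp [hp, wlen, this]

-- wlen is antitone in the bait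
theorem wlen_mono {b b' : Int} (h : b' ≤ b) (fs : List Int) :
    wlen b fs ≤ wlen b' fs := by
  induction fs with
  | nil => simp [wlen]
  | cons x rest ih =>
    by_cases hbx : b < x
    · have hbx' : b' < x := by omega
      simp only [wlen, List.takeWhile_cons, decide_eq_true_eq] at ih ⊢
      rw [if_pos hbx, if_pos hbx']
      simpa using ih
    · simp only [wlen, List.takeWhile_cons, decide_eq_true_eq]
      rw [if_neg hbx]
      simp

-- the joint loop invariant: A's fold over (remaining fish, total) equals B's fold over (total, pointer)
theorem loop_eq (fs : List Int) (hs : fs.Pairwise (fun a c => c ≤ a)) :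
    ∀ (bs : List Int), bs.Pairwise (fun a c => c ≤ a) →
    ∀ (t p : Nat), t ≤ p → (∀ b ∈ bs, p ≤ wlen b fs) →
      (bs.foldl (fun (st : List Int × Int) bait =>
          let count : Int := min 3 (((st.1.filter (fun f => decide (bait < f))).length : Int))
          (PySem.List.slice st.1 (some count) none, st.2 + count))
        (fs.drop t, (t : Int))).2
      = (bs.foldl (fun (st : Int × Nat) bait =>
          let p := pvWhileB fs bait st.2
          (st.1 + min 3 ((p : Int) - st.1), p))
        ((t : Int), p)).1 := by
  intro bs
  induction bs with
  | nil => intro _ t p _ _; simp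
  | cons b rest ih =>
    intro hbs t p htp hpw
    rcases List.pairwise_cons.mp hbs with ⟨hb, hrest⟩
    have hw : p ≤ wlen b fs := hpw b (List.mem_cons_self ..)
    have htw : t ≤ wlen b fs := le_trans htp hw
    -- A's count
    have hsdrop : (fs.drop t).Pairwise (fun a c => c ≤ a) :=
      List.Pairwise.sublist (List.drop_sublist t fs) hs
    have hfilter : (fs.drop t).filter (fun f => decide (b < f))
        = (fs.takeWhile (fun f => decide (b < f))).drop t := by
      rw [filter_eq_takeWhile_of_sorted b _ hsdrop,
        takeWhile_drop _ t fs htw]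
    have hlenA : ((fs.drop t).filter (fun f => decide (b < f))).length
        = wlen b fs - t := by
      rw [hfilter, List.length_drop]; rfl
    -- B's pointer
    have hp' : pvWhileB fs b p = wlen b fs := by
      rw [pvWhileB_eq fs b p, wlen, takeWhile_drop _ p fs hw, List.length_drop]
      have : wlen b fs = (fs.takeWhile (fun f => decide (b < f))).length := rfl
      omega
    -- the two counts agree
    set w := wlen b fs with hwdef
    have hcount : min 3 ((((fs.drop t).filter (fun f => decide (b < f))).length : Int))
        = min 3 ((w : Int) - (t : Int)) := by
      rw [hlenA]
      have : ((w - t : Nat) : Int) = (w : Int) - (t : Int) := by omega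
      rw [this]
    set c : Nat := min 3 (w - t) with hcdef
    have hcastc : min 3 ((w : Int) - (t : Int)) = (c : Int) := by omega
    simp only [List.foldl_cons, hcount, hp', hcastc]
    have hslice : PySem.List.slice (fs.drop t) (some (c : Int)) none = fs.drop (t + c) := by
      rw [PySem.List.slice_from_natCast, List.drop_drop]
    have hsum : (t : Int) + (c : Int) = ((t + c : Nat) : Int) := by push_cast; ring
    rw [hslice, hsum]
    exact ih hrest (t + c) w (by omega)
      (fun b' hb' => le_trans (le_of_eq hwdef.symm) (wlen_mono (hb b' hb') fs))

-- ===== VERDICT (by name: the statement is the Claim_ definition above) =====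
theorem max_fish_with_baits_spec : Claim_equal_max_fish_with_baits := by
  intro fish baits _
  unfold Spec_max_fish_with_baits max_fish_with_baits max_fish_with_baits_alt
  have hfs := PySem.List.sorted_pairwise_rev (xs := fish) (key := fun x => x)
  have hbs := PySem.List.sorted_pairwise_rev (xs := baits) (key := fun x => x)
  have := loop_eq (PySem.List.sorted fish (fun x => x) true) hfs
    (PySem.List.sorted baits (fun x => x) true) hbs 0 0 (le_refl 0)
    (fun _ _ => Nat.zero_le _)
  simpa using this
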